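-- pv_equiv track=rewrite | github.com/laracmv/Codewars-exercicios | python/string/level 7/sort_the_climbing_grades.py | sort_grades
-- ===== SOURCE A (Python) =====
-- def sort_grades(lst):
--     grades = ['VB', 'V0', 'V0+']
--     for i in range(1,18):
--         grades.append(f"V{i}")
--
--     final = []
--     for i in grades:
--         if i in lst:
--             final.append(i)
--     return final
-- ===== SOURCE B (Python) =====
-- # B: build the canonical order once as a rank index; dedupe lst, keep ranked grades, sort by rank.
-- _GRADES = ['VB', 'V0', 'V0+'] + [f"V{i}" for i in range(1, 18)]
-- _RANK = {g: r for r, g in enumerate(_GRADES)}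
--
-- def sort_grades(lst):
--     return sorted(set(lst) & _RANK.keys(), key=_RANK.get)
-- ===== Notes on version B (the rewrite author's own statement) =====
-- stated objective: idiomatic
-- what changed: Instead of scanning lst once per canonical grade (20 membership scans over lst), B builds a rank dictionary once, intersects set(lst) with its keys in a single hashing pass, and sorts the few surviving grades by rank.
import Mathlib
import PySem

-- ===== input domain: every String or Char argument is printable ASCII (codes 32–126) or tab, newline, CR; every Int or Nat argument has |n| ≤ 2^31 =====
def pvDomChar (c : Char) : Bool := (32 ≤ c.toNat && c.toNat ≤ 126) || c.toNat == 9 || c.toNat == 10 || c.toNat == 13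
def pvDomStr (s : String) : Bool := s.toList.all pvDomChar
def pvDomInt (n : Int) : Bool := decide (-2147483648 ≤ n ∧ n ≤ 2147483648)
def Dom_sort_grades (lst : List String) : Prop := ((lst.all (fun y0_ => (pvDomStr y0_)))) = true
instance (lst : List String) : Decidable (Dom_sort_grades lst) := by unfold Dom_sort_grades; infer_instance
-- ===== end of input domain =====

-- B replaces A's per-grade scans of lst with a rank dictionary built once, a set intersection, and a sort by rank (idiomatic).


-- ===== PORT A =====
def sort_grades (lst : List String) : List String :=
  let grades := (PySem.List.pyRange 1 18 1).foldl
    (fun acc i => acc ++ ["V" ++ PySem.Int.toStr i]) ["VB", "V0", "V0+"]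
  grades.foldl (fun final i => if lst.contains i then final ++ [i] else final) []

-- ===== PORT B =====
def pvGradesB : List String :=
  ["VB", "V0", "V0+"] ++ (PySem.List.pyRange 1 18 1).map (fun i => "V" ++ PySem.Int.toStr i)
def pvRank : PySem.Dict String Int :=
  PySem.Dict.ofList ((PySem.List.enumerate pvGradesB).map (fun p => (p.2, p.1)))
-- _RANK.get g: every sorted element is a key of _RANK, so the Optional is always some; ported as get?/getD.
def sort_grades_alt (lst : List String) : List String :=
  PySem.List.sorted (PySem.Set.inter (PySem.Set.ofList lst) (PySem.Dict.keys pvRank))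
    (fun g => (PySem.Dict.get? pvRank g).getD 0) false

-- ===== PRECONDITION & SPEC =====
def Spec_sort_grades (lst : List String) (out : List String) : Prop := out = sort_grades_alt lst
instance (lst : List String) (out : List String) : Decidable (Spec_sort_grades lst out) := by unfold Spec_sort_grades; infer_instance

-- ===== CLAIM (what is proved, stated in full; the proofs are below) =====
def Claim_equal_sort_grades : Prop := ∀ (lst : List String), Dom_sort_grades lst → Spec_sort_grades lst (sort_grades lst)

-- ===== LEMMAS AND PROOFS =====

-- the fully evaluated canonical grade list
def pvG : List String :=
  ["VB", "V0", "V0+", "V1", "V2", "V3", "V4", "V5", "V6", "V7", "V8", "V9",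
   "V10", "V11", "V12", "V13", "V14", "V15", "V16", "V17"]

theorem keys_pvRank : PySem.Dict.keys pvRank = pvG := by decide

theorem sort_grades_eq_filter (lst : List String) :
    sort_grades lst = pvG.filter lst.contains := by
  have h : (PySem.List.pyRange 1 18 1).foldl
      (fun acc i => acc ++ ["V" ++ PySem.Int.toStr i]) ["VB", "V0", "V0+"] = pvG := by decide
  show ((PySem.List.pyRange 1 18 1).foldl
      (fun acc i => acc ++ ["V" ++ PySem.Int.toStr i]) ["VB", "V0", "V0+"]).foldl
      (fun final i => if lst.contains i then final ++ [i] else final) []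
      = pvG.filter lst.contains
  rw [h, PySem.List.foldl_append_if_eq_filter]
  simp

theorem pvG_nodup : pvG.Nodup := by decide

theorem pvG_pairwise :
    pvG.Pairwise (fun a b =>
      (PySem.Dict.get? pvRank a).getD 0 < (PySem.Dict.get? pvRank b).getD 0) := by decide

theorem sort_grades_spec : Claim_equal_sort_grades := by
  intro lst _
  show sort_grades lst = sort_grades_alt lst
  rw [sort_grades_eq_filter]
  unfold sort_grades_alt
  rw [keys_pvRank]
  symm
  apply PySem.List.sorted_eq_of_perm_of_pairwise_lt
  · rw [List.perm_ext_iff_of_nodup (pvG_nodup.filter _)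
      (PySem.Set.nodup_inter (PySem.Set.ofList lst) pvG (PySem.Set.nodup_ofList lst))]
    intro x
    rw [List.mem_filter, PySem.Set.mem_inter, PySem.Set.mem_ofList]
    simp [and_comm]
  · exact pvG_pairwise.filter _
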